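-- pv_equiv track=rewrite | github.com/SagnikDev/Infytq-Programme-Codes | Python Learning/assignment_24.py | form_triangle
-- ===== SOURCE A (Python) =====
-- def form_triangle(num1,num2,num3):
--     #Do not change the messages provided below
--     success="Triangle can be formed"
--     failure="Triangle can't be formed"
--
--     #Write your logic here
--     sum=0
--     list_sides=[num1,num2,num3]
--     for i in range(0,len(list_sides)):
--         for j in range(0,len(list_sides)):
--             if(j==i):
--                 continue
--             else:
--                 sum=sum+list_sides[j]
--         if(sum<=list_sides[i]):
--             return failure
--             break
--         else:
--             sum=0
--     return success
-- ===== SOURCE B (Python) =====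
-- def form_triangle(num1, num2, num3):
--     success = "Triangle can be formed"
--     failure = "Triangle can't be formed"
--     sides = [num1, num2, num3]
--     big = max(sides)
--     return failure if sum(sides) - big <= big else success
-- ===== Notes on version B (the rewrite author's own statement) =====
-- stated objective: simpler
-- what changed: Replaced the nested loop summing the other two sides per index with a single closed-form check sum-max<=max, since only the largest side can violate the triangle inequality.
import Mathlib
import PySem

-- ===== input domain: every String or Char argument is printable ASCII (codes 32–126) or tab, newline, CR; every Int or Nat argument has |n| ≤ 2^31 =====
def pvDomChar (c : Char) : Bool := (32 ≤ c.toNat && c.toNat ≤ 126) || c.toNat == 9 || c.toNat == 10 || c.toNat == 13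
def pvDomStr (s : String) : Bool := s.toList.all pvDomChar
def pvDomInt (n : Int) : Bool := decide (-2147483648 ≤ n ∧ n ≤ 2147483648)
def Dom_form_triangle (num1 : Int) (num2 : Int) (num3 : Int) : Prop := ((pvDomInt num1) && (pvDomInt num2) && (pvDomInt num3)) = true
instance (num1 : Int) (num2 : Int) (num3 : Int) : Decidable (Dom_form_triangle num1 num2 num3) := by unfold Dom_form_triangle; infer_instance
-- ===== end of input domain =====

-- B replaces A's nested per-side loop with the single closed-form check sum - max <= max (simpler).


-- ===== PORT A =====
-- Literal port of A: nested range loop accumulating the sum of the other sides,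
-- early return via an Option accumulator; sum is reset to 0 only on the else branch, as in A.
def form_triangle (num1 : Int) (num2 : Int) (num3 : Int) : String :=
  let success := "Triangle can be formed"
  let failure := "Triangle can't be formed"
  let list_sides := [num1, num2, num3]
  let st := (PySem.List.pyRange 0 (list_sides.length : Int) 1).foldl
    (fun (st : Option String × Int) i =>
      match st.1 with
      | some _ => st
      | none =>
        let s := (PySem.List.pyRange 0 (list_sides.length : Int) 1).foldl
          (fun s j => if j = i then s else s + (PySem.List.pyGet? list_sides j).getD 0) st.2
        if s ≤ (PySem.List.pyGet? list_sides i).getD 0 then (some failure, s) else (none, 0))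
    (none, 0)
  st.1.getD success

-- ===== PORT B =====
-- Port of B: single comparison sum(sides) - max(sides) <= max(sides).
def form_triangle_alt (num1 : Int) (num2 : Int) (num3 : Int) : String :=
  let success := "Triangle can be formed"
  let failure := "Triangle can't be formed"
  let sides := [num1, num2, num3]
  let big := (PySem.List.max? sides (fun x => x)).getD 0
  if sides.sum - big ≤ big then failure else success

-- ===== PRECONDITION & SPEC =====
def Spec_form_triangle (num1 : Int) (num2 : Int) (num3 : Int) (out : String) : Prop := out = form_triangle_alt num1 num2 num3
instance (num1 : Int) (num2 : Int) (num3 : Int) (out : String) : Decidable (Spec_form_triangle num1 num2 num3 out) := by unfold Spec_form_triangle; infer_instance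

-- ===== CLAIM (what is proved, stated in full; the proofs are below) =====
def Claim_equal_form_triangle : Prop := ∀ (num1 : Int) (num2 : Int) (num3 : Int), Dom_form_triangle num1 num2 num3 → Spec_form_triangle num1 num2 num3 (form_triangle num1 num2 num3)

-- ===== LEMMAS AND PROOFS =====

-- ===== VERDICT (by name: the statement is the Claim_ definition above) =====
-- The max of a 3-element list written as nested ifs, so that split_ifs sees every branch.
lemma pvMax3_eq (a b c : Int) :
    (PySem.List.max? [a, b, c] (fun x => x)).getD 0 =
      if a < b then (if b < c then c else b) else (if a < c then c else a) := by
  simp only [PySem.List.max?, List.foldl]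
  split_ifs <;> simp_all <;> split_ifs <;> simp_all <;> omega

theorem form_triangle_spec : Claim_equal_form_triangle := by
  intro num1 num2 num3 _
  unfold Spec_form_triangle form_triangle form_triangle_alt
  dsimp only
  rw [pvMax3_eq]
  norm_num [PySem.List.pyRange, PySem.List.pyGet?, PySem.List.pyIdx?, show Int.toNat 3 = 3 from rfl, show Int.toNat 2 = 2 from rfl,
    show Int.toNat 1 = 1 from rfl, show Int.toNat 0 = 0 from rfl,
    List.getElem_cons_zero, List.getElem_cons_succ,
    List.range_succ, List.range_zero, List.map_append, List.map, List.foldl_append, List.foldl]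
  split_ifs <;> dsimp only at * <;> first | rfl | omega
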